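-- pv_equiv track=rewrite | github.com/thehalleyyoung/deppy | src/deppy/types/carriers.py | _merge_refinements
-- ===== SOURCE A (Python) =====
-- from typing import (
--     Any,
--     Callable,
--     Dict,
--     FrozenSet,
--     Iterator,
--     List,
--     Mapping,
--     Optional,
--     Sequence,
--     Set,
--     Tuple,
-- )
--
-- def _merge_refinements(
--
--     refinement_dicts: Sequence[Dict[str, Any]],
-- ) -> Dict[str, Any]:
--     """Merge site refinement dictionaries.
--
--     Takes the intersection of keys and uses the first value for each key
--     (under the assumption that compatible carriers agree on refinement values).
--     """
--     if not refinement_dicts: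
--         return {}
--     all_keys = set(refinement_dicts[0].keys())
--     for rd in refinement_dicts[1:]:
--         all_keys &= set(rd.keys())
--     merged: Dict[str, Any] = {}
--     for key in all_keys:
--         values = [rd[key] for rd in refinement_dicts if key in rd]
--         if values:
--             merged[key] = values[0]
--     return merged
-- ===== SOURCE B (Python) =====
-- def _merge_refinements(refinement_dicts):
--     """Merge site refinement dictionaries: intersection of keys, first dict's value.
--
--     Counting strategy: tally how many dicts contain each key in one flat pass
--     (keys are unique within a dict), then keep a pair of the first dict exactly
--     when its key's tally equals the number of dicts. No membership tests, no
--     intersection sets.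
--     """
--     if not refinement_dicts:
--         return {}
--     n = len(refinement_dicts)
--     counts = {}
--     for rd in refinement_dicts:
--         for key in rd:
--             counts[key] = counts.get(key, 0) + 1
--     return {key: value for key, value in refinement_dicts[0].items()
--             if counts[key] == n}
-- ===== Notes on version B (the rewrite author's own statement) =====
-- stated objective: alternative
-- what changed: B replaces key-set intersection and per-key membership scans by a frequency counter: one flat pass tallies in how many dicts each key occurs, and a pair of the first dict is kept iff its tally equals the number of dicts; no set operations or 'key in rd' tests remain.
import Mathlib
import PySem

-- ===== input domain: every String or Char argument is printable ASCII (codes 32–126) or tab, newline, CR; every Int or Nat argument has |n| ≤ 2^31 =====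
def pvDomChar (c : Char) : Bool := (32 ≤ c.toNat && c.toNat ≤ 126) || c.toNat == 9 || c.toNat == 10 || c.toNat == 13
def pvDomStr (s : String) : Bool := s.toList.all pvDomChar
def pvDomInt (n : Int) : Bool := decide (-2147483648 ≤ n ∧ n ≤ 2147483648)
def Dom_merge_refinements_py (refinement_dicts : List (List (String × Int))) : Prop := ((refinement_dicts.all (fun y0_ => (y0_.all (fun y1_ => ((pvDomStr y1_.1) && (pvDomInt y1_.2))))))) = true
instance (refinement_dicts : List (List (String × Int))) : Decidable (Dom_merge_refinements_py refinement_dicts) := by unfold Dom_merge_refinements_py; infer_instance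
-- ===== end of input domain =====

-- B replaces A's key-set intersections and per-key membership scans by one flat
-- counting pass over all dicts' keys plus a filter of the first dict (objective:
-- alternative; same asymptotic cost, no set operations).

-- ===== PORT A =====
-- Literal port of A: build the intersection set of all key sets, then loop over it
-- collecting the values of each key from every dict that contains it, keeping the first.
def merge_refinements_py (refinement_dicts : List (List (String × Int))) : List (String × Int) :=
  match refinement_dicts with
  | [] => []
  | rd0 :: rest =>
    let all_keys : PySem.Set String :=
      rest.foldl
        (fun ks rd => PySem.Set.inter ks (PySem.Set.ofList (PySem.Dict.ofList rd).keys))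
        (PySem.Set.ofList (PySem.Dict.ofList rd0).keys)
    let merged : PySem.Dict String Int :=
      all_keys.foldl
        (fun m key =>
          let values := ((rd0 :: rest).filter
              (fun rd => (PySem.Dict.ofList rd).contains key)).map
            (fun rd => (PySem.Dict.ofList rd).getD key 0)
          if values.isEmpty then m else m.insert key (values.headD 0))
        PySem.Dict.empty
    merged.items

-- ===== PORT B =====
-- Literal port of B: tally in how many dicts each key occurs (counts.get(key,0)+1),
-- then keep a pair of the first dict iff its key's tally equals the number of dicts.
def merge_refinements_py_alt (refinement_dicts : List (List (String × Int))) : List (String × Int) :=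
  match refinement_dicts with
  | [] => []
  | first :: rest =>
    let n : Int := ((first :: rest).length : Int)
    let counts : PySem.Dict String Int :=
      (first :: rest).foldl
        (fun c rd => (PySem.Dict.ofList rd).keys.foldl
          (fun c key => c.insert key (c.getD key 0 + 1)) c)
        PySem.Dict.empty
    (PySem.Dict.ofList first).items.filter (fun kv => counts.getD kv.1 0 == n)

-- ===== PRECONDITION & SPEC =====
def Spec_merge_refinements_py (refinement_dicts : List (List (String × Int))) (out : List (String × Int)) : Prop := out = merge_refinements_py_alt refinement_dicts
instance (refinement_dicts : List (List (String × Int))) (out : List (String × Int)) : Decidable (Spec_merge_refinements_py refinement_dicts out) := by unfold Spec_merge_refinements_py; infer_instance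

-- ===== CLAIM (what is proved, stated in full; the proofs are below) =====
def Claim_equal_merge_refinements_py : Prop := ∀ (refinement_dicts : List (List (String × Int))), Dom_merge_refinements_py refinement_dicts → Spec_merge_refinements_py refinement_dicts (merge_refinements_py refinement_dicts)

-- ===== LEMMAS AND PROOFS =====

-- A's intersection loop is a filter of the initial key list by membership in every dict
lemma merge_foldl_inter (rest : List (List (String × Int))) (s : List String) :
    rest.foldl (fun ks rd => PySem.Set.inter ks (PySem.Set.ofList (PySem.Dict.ofList rd).keys)) s
      = s.filter (fun k => rest.all (fun rd => (PySem.Dict.ofList rd).contains k)) := by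
  induction rest generalizing s with
  | nil => simp
  | cons rd rest ih =>
    rw [List.foldl_cons, ih]
    show (PySem.Set.inter s _).filter _ = _
    unfold PySem.Set.inter
    rw [List.filter_filter]
    apply List.filter_congr
    intro k _
    simp [PySem.Dict.contains_eq_decide_mem_keys, Bool.and_comm]

-- A reduces to: filter the first dict's items by membership in every remaining dict
lemma merge_A_eq_filter (rd0 : List (String × Int)) (rest : List (List (String × Int))) :
    merge_refinements_py (rd0 :: rest)
      = (PySem.Dict.ofList rd0).items.filter
          (fun kv => rest.all (fun rd => (PySem.Dict.ofList rd).contains kv.1)) := by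
  have hk : (PySem.Dict.ofList rd0).keys.Nodup := PySem.Dict.nodup_keys_ofList rd0
  simp only [merge_refinements_py]
  rw [merge_foldl_inter, PySem.Set.ofList_eq_self_of_nodup _ hk]
  set d0 := PySem.Dict.ofList rd0 with hd0
  set P : String → Bool := fun k => rest.all (fun rd => (PySem.Dict.ofList rd).contains k) with hP
  have hstep : ∀ (m : PySem.Dict String Int), ∀ k ∈ d0.keys.filter P,
      (let values := ((rd0 :: rest).filter
          (fun rd => (PySem.Dict.ofList rd).contains k)).map
        (fun rd => (PySem.Dict.ofList rd).getD k 0)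
       if values.isEmpty then m else m.insert k (values.headD 0))
      = m.insert k (d0.getD k 0) := by
    intro m k hkmem
    have hmem : k ∈ d0.keys := (List.mem_filter.mp hkmem).1
    have hc : d0.contains k = true := by
      rw [PySem.Dict.contains_iff_mem_keys]; exact hmem
    simp [← hd0, hc]
  rw [PySem.List.foldl_congr_mem _ _ (fun m k => m.insert k (d0.getD k 0)) _ hstep]
  rw [PySem.Dict.items_foldl_insert_fresh (d0.keys.filter P) (fun a => a)
      (fun a => d0.getD a 0) PySem.Dict.empty
      (by intro a _; simp [PySem.Dict.contains_empty])
      (by simpa using hk.filter P)]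
  rw [PySem.Dict.items_eq_map_keys d0 hk 0, List.filter_map]
  rfl

-- B's counter: after the flat counting pass, the tally of k is the number of dicts containing k
lemma merge_counts_getD (rds : List (List (String × Int))) (c : PySem.Dict String Int) (k : String) :
    (rds.foldl
        (fun c rd => (PySem.Dict.ofList rd).keys.foldl
          (fun c key => c.insert key (c.getD key 0 + 1)) c)
        c).getD k 0
      = c.getD k 0 + (rds.countP (fun rd => (PySem.Dict.ofList rd).contains k) : Int) := by
  induction rds generalizing c with
  | nil => simp
  | cons rd rest ih =>
    rw [List.foldl_cons, ih, PySem.Dict.getD_foldl_insert_add_one]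
    have hcount : ((PySem.Dict.ofList rd).keys.count k : Int)
        = if (PySem.Dict.ofList rd).contains k then 1 else 0 := by
      have hk : (PySem.Dict.ofList rd).keys.Nodup := PySem.Dict.nodup_keys_ofList rd
      rw [PySem.Dict.contains_eq_decide_mem_keys]
      by_cases h : k ∈ (PySem.Dict.ofList rd).keys
      · rw [List.count_eq_one_of_mem hk h]; simp [h]
      · simp [h, List.count_eq_zero_of_not_mem h]
    rw [List.countP_cons]
    by_cases h : (PySem.Dict.ofList rd).contains k = true <;> simp [h] at hcount ⊢ <;> omega

-- ===== VERDICT (by name: the statement is the Claim_ definition above) =====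
theorem merge_refinements_py_spec : Claim_equal_merge_refinements_py := by
  intro rds _
  show merge_refinements_py rds = merge_refinements_py_alt rds
  cases rds with
  | nil => rfl
  | cons rd0 rest =>
    rw [merge_A_eq_filter]
    simp only [merge_refinements_py_alt]
    apply List.filter_congr
    intro kv hkv
    have hmem : kv.1 ∈ (PySem.Dict.ofList rd0).keys :=
      PySem.Dict.mem_keys_of_mem_items _ hkv
    have hc0 : (PySem.Dict.ofList rd0).contains kv.1 = true := by
      rw [PySem.Dict.contains_iff_mem_keys]; exact hmem
    rw [merge_counts_getD]
    have hall : (rest.countP (fun rd => (PySem.Dict.ofList rd).contains kv.1) = rest.length)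
        ↔ rest.all (fun rd => (PySem.Dict.ofList rd).contains kv.1) = true := by
      rw [List.countP_eq_length, List.all_eq_true]
    simp only [List.countP_cons, hc0, PySem.Dict.getD_empty, List.length_cons, if_true]
    symm
    cases h : rest.all (fun rd => (PySem.Dict.ofList rd).contains kv.1) with
    | true =>
      have hc : rest.countP (fun rd => (PySem.Dict.ofList rd).contains kv.1) = rest.length :=
        hall.mpr h
      simp only [beq_iff_eq]
      push_cast [hc]
      ring
    | false =>
      have hne : rest.countP (fun rd => (PySem.Dict.ofList rd).contains kv.1) ≠ rest.length :=
        fun he => by simp [hall.mp he] at h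
      rw [beq_eq_false_iff_ne]
      intro habs
      apply hne
      omega
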